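-- pv_equiv track=rewrite | github.com/mojitopro/MoJiTo | tools/legacy/scrape_m3u_premium.py | get_category_from_group
-- ===== SOURCE A (Python) =====
-- def get_category_from_group(group):
--     """Determina la categoría basándose en el group-title"""
--     group_lower = (group or '').lower()
--
--     if any(x in group_lower for x in ['movie', 'cine', 'film']):
--         return 'Cine'
--     elif any(x in group_lower for x in ['sport', 'deporte', 'futbol', 'football']):
--         return 'Deportes'
--     elif any(x in group_lower for x in ['news', 'noticia']):
--         return 'Noticias'
--     elif any(x in group_lower for x in ['kids', 'child', 'anime', 'cartoon']):
--         return 'Infantil'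
--     elif any(x in group_lower for x in ['music', 'musica']):
--         return 'Musica'
--     elif any(x in group_lower for x in ['doc', 'science', 'nature', 'history']):
--         return 'Documental'
--     elif any(x in group_lower for x in ['entertainment', 'series', 'tv']):
--         return 'Entretenimiento'
--     return 'General'
-- ===== SOURCE B (Python) =====
-- # Single left-to-right scan over the title: at each position, match all keywords
-- # (flattened with their priority) and keep the smallest priority seen; the
-- # category array is indexed by that priority at the end.
-- _KEYWORDS = [
--     ('movie', 0), ('cine', 0), ('film', 0),
--     ('sport', 1), ('deporte', 1), ('futbol', 1), ('football', 1),
--     ('news', 2), ('noticia', 2),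
--     ('kids', 3), ('child', 3), ('anime', 3), ('cartoon', 3),
--     ('music', 4), ('musica', 4),
--     ('doc', 5), ('science', 5), ('nature', 5), ('history', 5),
--     ('entertainment', 6), ('series', 6), ('tv', 6),
-- ]
-- _CATEGORIES = ['Cine', 'Deportes', 'Noticias', 'Infantil', 'Musica',
--                'Documental', 'Entretenimiento', 'General']
--
--
-- def get_category_from_group(group):
--     """Determina la categoría basándose en el group-title"""
--     g = (group or '').lower()
--     best = len(_CATEGORIES) - 1
--     for i in range(len(g)):
--         for kw, p in _KEYWORDS:
--             if p < best and g.startswith(kw, i):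
--                 best = p
--     return _CATEGORIES[best]
-- ===== Notes on version B (the rewrite author's own statement) =====
-- stated objective: alternative
-- what changed: Instead of running one whole-string substring search per category in priority order, B makes a single left-to-right scan over the title, matching every keyword at each position and keeping the minimum priority, then indexes a category array.
import Mathlib
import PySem

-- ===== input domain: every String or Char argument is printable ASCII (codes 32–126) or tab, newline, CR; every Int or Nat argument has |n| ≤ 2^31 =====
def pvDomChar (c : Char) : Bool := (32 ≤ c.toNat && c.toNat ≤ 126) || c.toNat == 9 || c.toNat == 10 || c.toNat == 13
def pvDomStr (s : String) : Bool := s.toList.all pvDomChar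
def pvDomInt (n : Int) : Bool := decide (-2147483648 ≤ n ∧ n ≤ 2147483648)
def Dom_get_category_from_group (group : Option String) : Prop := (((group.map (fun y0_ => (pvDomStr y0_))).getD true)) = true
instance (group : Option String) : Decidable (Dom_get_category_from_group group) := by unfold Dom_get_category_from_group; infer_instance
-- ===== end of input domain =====

-- B replaces A's per-category whole-string substring searches by a single position scan
-- that keeps the minimum matching keyword priority (alternative algorithm; same cost).

-- ===== PORT A =====
def get_category_from_group (group : Option String) : String :=
  let group_lower := PySem.Str.lower (group.getD "")
  if ["movie", "cine", "film"].any (fun x => PySem.Str.isIn x group_lower) then "Cine"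
  else if ["sport", "deporte", "futbol", "football"].any (fun x => PySem.Str.isIn x group_lower) then "Deportes"
  else if ["news", "noticia"].any (fun x => PySem.Str.isIn x group_lower) then "Noticias"
  else if ["kids", "child", "anime", "cartoon"].any (fun x => PySem.Str.isIn x group_lower) then "Infantil"
  else if ["music", "musica"].any (fun x => PySem.Str.isIn x group_lower) then "Musica"
  else if ["doc", "science", "nature", "history"].any (fun x => PySem.Str.isIn x group_lower) then "Documental"
  else if ["entertainment", "series", "tv"].any (fun x => PySem.Str.isIn x group_lower) then "Entretenimiento"
  else "General"

-- ===== PORT B =====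
def pvKeywords : List (String × Nat) :=
  [ ("movie", 0), ("cine", 0), ("film", 0),
    ("sport", 1), ("deporte", 1), ("futbol", 1), ("football", 1),
    ("news", 2), ("noticia", 2),
    ("kids", 3), ("child", 3), ("anime", 3), ("cartoon", 3),
    ("music", 4), ("musica", 4),
    ("doc", 5), ("science", 5), ("nature", 5), ("history", 5),
    ("entertainment", 6), ("series", 6), ("tv", 6) ]

def pvCategories : List String :=
  ["Cine", "Deportes", "Noticias", "Infantil", "Musica",
   "Documental", "Entretenimiento", "General"]

-- g.startswith(kw, i) for 0 ≤ i is exactly 'kw is a prefix of g dropped at i'.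
def get_category_from_group_alt (group : Option String) : String :=
  let g := (PySem.Str.lower (group.getD "")).toList
  let best := (List.range g.length).foldl
    (fun best i =>
      pvKeywords.foldl
        (fun best kp =>
          if kp.2 < best ∧ PySem.Chars.startswith (g.drop i) kp.1.toList then kp.2 else best)
        best)
    (pvCategories.length - 1)
  pvCategories.getD best "General"

-- ===== PRECONDITION & SPEC =====
def Spec_get_category_from_group (group : Option String) (out : String) : Prop := out = get_category_from_group_alt group
instance (group : Option String) (out : String) : Decidable (Spec_get_category_from_group group out) := by unfold Spec_get_category_from_group; infer_instance

-- ===== CLAIM (what is proved, stated in full; the proofs are below) =====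
def Claim_equal_get_category_from_group : Prop := ∀ (group : Option String), Dom_get_category_from_group group → Spec_get_category_from_group group (get_category_from_group group)

-- ===== LEMMAS AND PROOFS =====

-- a keyword (from kl) of priority p matches as a prefix of the suffix of g starting at i
def pvHitAt (kl : List (String × Nat)) (g : List Char) (i : Nat) (p : Nat) : Prop :=
  ∃ kp ∈ kl, kp.2 = p ∧ kp.1.toList <+: g.drop i

def pvHit (g : List Char) (p : Nat) : Prop := ∃ i ∈ List.range g.length, pvHitAt pvKeywords g i p

-- spec of the inner fold (arbitrary keyword list, fixed suffix)
theorem pv_inner_spec (s : List Char) (l : List (String × Nat)) (b : Nat) :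
    let r := l.foldl (fun best kp =>
      if kp.2 < best ∧ PySem.Chars.startswith s kp.1.toList then kp.2 else best) b
    r ≤ b ∧ (r = b ∨ ∃ kp ∈ l, kp.2 = r ∧ kp.1.toList <+: s) ∧
      (∀ kp ∈ l, kp.1.toList <+: s → r ≤ kp.2) := by
  induction l generalizing b with
  | nil => simp
  | cons kp l ih =>
    simp only [List.foldl_cons]
    by_cases h : kp.2 < b ∧ PySem.Chars.startswith s kp.1.toList
    · rw [if_pos h]
      obtain ⟨h1, h2, h3⟩ := ih kp.2
      refine ⟨le_of_lt (lt_of_le_of_lt h1 h.1), ?_, ?_⟩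
      · rcases h2 with h2 | ⟨kp', hm, he, hp⟩
        · exact Or.inr ⟨kp, by simp, h2.symm ▸ rfl, (PySem.Chars.startswith_iff _ _).mp h.2⟩
        · exact Or.inr ⟨kp', by simp [hm], he, hp⟩
      · intro kp' hm hp
        rcases List.mem_cons.mp hm with he | hm'
        · exact he ▸ h1
        · exact h3 kp' hm' hp
    · rw [if_neg h]
      obtain ⟨h1, h2, h3⟩ := ih b
      refine ⟨h1, ?_, ?_⟩
      · rcases h2 with h2 | ⟨kp', hm, he, hp⟩
        · exact Or.inl h2
        · exact Or.inr ⟨kp', by simp [hm], he, hp⟩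
      · intro kp' hm hp
        rcases List.mem_cons.mp hm with he | hm'
        · subst he
          rcases Nat.lt_or_ge kp'.2 b with hlt | hge
          -- had it matched with kp.2 < b, the branch would have fired
          · exact absurd ⟨hlt, (PySem.Chars.startswith_iff _ _).mpr hp⟩ h
          · exact le_trans h1 hge
        · exact h3 kp' hm' hp

-- spec of the outer fold (arbitrary keyword list and position list)
theorem pv_outer_spec (kl : List (String × Nat)) (g : List Char) (l : List Nat) (b : Nat) :
    let r := l.foldl (fun best i =>
      kl.foldl (fun best kp =>
        if kp.2 < best ∧ PySem.Chars.startswith (g.drop i) kp.1.toList then kp.2 else best) best) b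
    r ≤ b ∧ (r = b ∨ ∃ i ∈ l, pvHitAt kl g i r) ∧
      (∀ i ∈ l, ∀ p, pvHitAt kl g i p → r ≤ p) := by
  induction l generalizing b with
  | nil => simp
  | cons i l ih =>
    simp only [List.foldl_cons]
    obtain ⟨s1, s2, s3⟩ := pv_inner_spec (g.drop i) kl b
    obtain ⟨h1, h2, h3⟩ := ih (kl.foldl (fun best kp =>
      if kp.2 < best ∧ PySem.Chars.startswith (g.drop i) kp.1.toList then kp.2 else best) b)
    refine ⟨le_trans h1 s1, ?_, ?_⟩
    · rcases h2 with h2 | ⟨i', hm, hh⟩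
      · rcases s2 with s2 | ⟨kp, hm, he, hp⟩
        · exact Or.inl (h2.trans s2)
        · exact Or.inr ⟨i, by simp, kp, hm, he.trans h2.symm, hp⟩
      · exact Or.inr ⟨i', by simp [hm], hh⟩
    · intro i' hm p hh
      rcases List.mem_cons.mp hm with he | hm'
      · subst he
        obtain ⟨kp, hkm, hke, hkp⟩ := hh
        exact le_trans h1 (hke ▸ s3 kp hkm hkp)
      · exact h3 i' hm' p hh

-- all keywords are nonempty and all priorities are ≤ 6 (checked by evaluation)
theorem pv_table_facts :
    pvKeywords.all (fun kp => !kp.1.toList.isEmpty && decide (kp.2 ≤ 6)) = true := by decide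

theorem pv_key_ne (kp : String × Nat) (h : kp ∈ pvKeywords) : kp.1.toList ≠ [] := by
  have := (List.all_eq_true.mp pv_table_facts) kp h
  simp only [Bool.and_eq_true, Bool.not_eq_true', List.isEmpty_eq_false_iff] at this
  exact this.1

theorem pv_prio_le (kp : String × Nat) (h : kp ∈ pvKeywords) : kp.2 ≤ 6 := by
  have := (List.all_eq_true.mp pv_table_facts) kp h
  simp only [Bool.and_eq_true, decide_eq_true_eq] at this
  exact this.2

-- pvHit g p ↔ some keyword of priority p is an infix of g
theorem pv_hit_iff (g : List Char) (p : Nat) :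
    pvHit g p ↔ ∃ kp ∈ pvKeywords, kp.2 = p ∧ kp.1.toList <:+: g := by
  constructor
  · rintro ⟨i, _, kp, hm, he, hp⟩
    exact ⟨kp, hm, he, hp.isInfix.trans (List.drop_suffix i g).isInfix⟩
  · rintro ⟨kp, hm, he, hinf⟩
    obtain ⟨s, t, hst⟩ := hinf
    have hne : 0 < kp.1.toList.length := List.length_pos_iff.mpr (pv_key_ne kp hm)
    have hlen : g.length = s.length + kp.1.toList.length + t.length := by
      rw [← hst]; simp; omega
    refine ⟨s.length, by simp only [List.mem_range]; omega, kp, hm, he, ?_⟩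
    rw [← hst, List.append_assoc, List.drop_left]
    exact List.prefix_append _ _

-- ===== VERDICT =====
set_option maxHeartbeats 1000000 in
theorem get_category_from_group_spec : Claim_equal_get_category_from_group := by
  intro group _
  unfold Spec_get_category_from_group
  simp only [get_category_from_group, get_category_from_group_alt]
  set gl := PySem.Str.lower (group.getD "") with hgl
  set g : List Char := gl.toList with hg
  obtain ⟨h1, h2, h3⟩ := pv_outer_spec pvKeywords g (List.range g.length) (pvCategories.length - 1)
  set r := (List.range g.length).foldl
    (fun best i =>
      pvKeywords.foldl
        (fun best kp =>
          if kp.2 < best ∧ PySem.Chars.startswith (g.drop i) kp.1.toList then kp.2 else best)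
        best)
    (pvCategories.length - 1) with hr
  have hb : pvCategories.length - 1 = 7 := by decide
  rw [hb] at h1
  have hmin : ∀ p, pvHit g p → r ≤ p := by
    rintro p ⟨i, him, hh⟩
    exact h3 i him p hh
  have hself : r = 7 ∨ pvHit g r := by
    rcases h2 with h2 | ⟨i, him, hh⟩
    · exact Or.inl (h2.trans hb)
    · exact Or.inr ⟨i, him, hh⟩
  have hc0 : (["movie", "cine", "film"].any (fun x => PySem.Str.isIn x gl) = true) ↔ pvHit g 0 := by
    rw [pv_hit_iff]
    simp [PySem.Chars.isIn_iff_infix, pvKeywords, ← hg]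
  have hc1 : (["sport", "deporte", "futbol", "football"].any (fun x => PySem.Str.isIn x gl) = true) ↔ pvHit g 1 := by
    rw [pv_hit_iff]
    simp [PySem.Chars.isIn_iff_infix, pvKeywords, ← hg]
  have hc2 : (["news", "noticia"].any (fun x => PySem.Str.isIn x gl) = true) ↔ pvHit g 2 := by
    rw [pv_hit_iff]
    simp [PySem.Chars.isIn_iff_infix, pvKeywords, ← hg]
  have hc3 : (["kids", "child", "anime", "cartoon"].any (fun x => PySem.Str.isIn x gl) = true) ↔ pvHit g 3 := by
    rw [pv_hit_iff]
    simp [PySem.Chars.isIn_iff_infix, pvKeywords, ← hg]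
  have hc4 : (["music", "musica"].any (fun x => PySem.Str.isIn x gl) = true) ↔ pvHit g 4 := by
    rw [pv_hit_iff]
    simp [PySem.Chars.isIn_iff_infix, pvKeywords, ← hg]
  have hc5 : (["doc", "science", "nature", "history"].any (fun x => PySem.Str.isIn x gl) = true) ↔ pvHit g 5 := by
    rw [pv_hit_iff]
    simp [PySem.Chars.isIn_iff_infix, pvKeywords, ← hg]
  have hc6 : (["entertainment", "series", "tv"].any (fun x => PySem.Str.isIn x gl) = true) ↔ pvHit g 6 := by
    rw [pv_hit_iff]
    simp [PySem.Chars.isIn_iff_infix, pvKeywords, ← hg]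
  by_cases m0 : pvHit g 0
  · have h0 : r = 0 := Nat.le_zero.mp (hmin 0 m0)
    rw [if_pos (hc0.mpr m0), h0]
    decide
  · rw [if_neg (fun h => m0 (hc0.mp h))]
    have hr0 : r ≠ 0 := by
      intro h; rcases hself with h7 | hh
      · omega
      · rw [h] at hh; exact m0 hh
    by_cases m1 : pvHit g 1
    · have he : r = 1 := by have := hmin 1 m1; omega
      rw [if_pos (hc1.mpr m1), he]; decide
    · rw [if_neg (fun h => m1 (hc1.mp h))]
      have hr1 : r ≠ 1 := by
        intro h; rcases hself with h7 | hh
        · omega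
        · rw [h] at hh; exact m1 hh
      by_cases m2 : pvHit g 2
      · have he : r = 2 := by have := hmin 2 m2; omega
        rw [if_pos (hc2.mpr m2), he]; decide
      · rw [if_neg (fun h => m2 (hc2.mp h))]
        have hr2 : r ≠ 2 := by
          intro h; rcases hself with h7 | hh
          · omega
          · rw [h] at hh; exact m2 hh
        by_cases m3 : pvHit g 3
        · have he : r = 3 := by have := hmin 3 m3; omega
          rw [if_pos (hc3.mpr m3), he]; decide
        · rw [if_neg (fun h => m3 (hc3.mp h))]
          have hr3 : r ≠ 3 := by
            intro h; rcases hself with h7 | hh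
            · omega
            · rw [h] at hh; exact m3 hh
          by_cases m4 : pvHit g 4
          · have he : r = 4 := by have := hmin 4 m4; omega
            rw [if_pos (hc4.mpr m4), he]; decide
          · rw [if_neg (fun h => m4 (hc4.mp h))]
            have hr4 : r ≠ 4 := by
              intro h; rcases hself with h7 | hh
              · omega
              · rw [h] at hh; exact m4 hh
            by_cases m5 : pvHit g 5
            · have he : r = 5 := by have := hmin 5 m5; omega
              rw [if_pos (hc5.mpr m5), he]; decide
            · rw [if_neg (fun h => m5 (hc5.mp h))]
              have hr5 : r ≠ 5 := by
                intro h; rcases hself with h7 | hh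
                · omega
                · rw [h] at hh; exact m5 hh
              by_cases m6 : pvHit g 6
              · have he : r = 6 := by have := hmin 6 m6; omega
                rw [if_pos (hc6.mpr m6), he]; decide
              · rw [if_neg (fun h => m6 (hc6.mp h))]
                have hr6 : r = 7 := by
                  rcases hself with h7 | hh
                  · exact h7
                  · exfalso
                    obtain ⟨i, him, kp, hm, he, hp⟩ := hh
                    have h6 := pv_prio_le kp hm
                    have hle : r ≤ 6 := he ▸ h6
                    have h66 : r = 6 := by omega
                    exact m6 ⟨i, him, kp, hm, h66 ▸ he, hp⟩
                rw [hr6]; decide
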